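-- pv_equiv track=rewrite | github.com/ASL-19/outline-bots | src/telegram/telegram.py | make_keyboard
-- ===== SOURCE A (Python) =====
-- MAX_ITEMS_PER_ROW = 4
--
-- def make_keyboard(items, items_per_row=0, add_home=""):
--     """
--     Makes a keyboard json out of items list and order them per items_per_row.
--
--     :param items: buttons texts list
--     :param items_per_row: Number of items per row, if not specified it uses its own algorithm.
--     :param add_home: if it should add a back to home button
--     :return: keyboard object for use in Telegram API
--     """
--     keyboard = []
--     row = []
--     count = 0
--
--     if items_per_row > MAX_ITEMS_PER_ROW or items_per_row < 1:
--         items_per_row = MAX_ITEMS_PER_ROW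
--
--     for item in items:
--         row.append(item)
--         count += 1
--         if count == items_per_row:
--             keyboard.append(list(row))
--             row = []
--             count = 0
--
--     if len(row) != 0:
--         keyboard.append(list(row))
--
--     if add_home != "":
--         keyboard.append([add_home])
--
--     return keyboard
-- ===== SOURCE B (Python) =====
-- MAX_ITEMS_PER_ROW = 4
--
-- def make_keyboard(items, items_per_row=0, add_home=""):
--     if not (1 <= items_per_row <= MAX_ITEMS_PER_ROW):
--         items_per_row = MAX_ITEMS_PER_ROW
--     keyboard = []
--     i = 0
--     while i < len(items):
--         keyboard.append(items[i:i + items_per_row])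
--         i += items_per_row
--     if add_home != "":
--         keyboard.append([add_home])
--     return keyboard
-- ===== Notes on version B (the rewrite author's own statement) =====
-- stated objective: simpler
-- what changed: Replaces the element-wise accumulation with row/count/flush state by a loop over chunk start indices that slices each whole row items[i:i+k], maintaining no per-row state.
import Mathlib
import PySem

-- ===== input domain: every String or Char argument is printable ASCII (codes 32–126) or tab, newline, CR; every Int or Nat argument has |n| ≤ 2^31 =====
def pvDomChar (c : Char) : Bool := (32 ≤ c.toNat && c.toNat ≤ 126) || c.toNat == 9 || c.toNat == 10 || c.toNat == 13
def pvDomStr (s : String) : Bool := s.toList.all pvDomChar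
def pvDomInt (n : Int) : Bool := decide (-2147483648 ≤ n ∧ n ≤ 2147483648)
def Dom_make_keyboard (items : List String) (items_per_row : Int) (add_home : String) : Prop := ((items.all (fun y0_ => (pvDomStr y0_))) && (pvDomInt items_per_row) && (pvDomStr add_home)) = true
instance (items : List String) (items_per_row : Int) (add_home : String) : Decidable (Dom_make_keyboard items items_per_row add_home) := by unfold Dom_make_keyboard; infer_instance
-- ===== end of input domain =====

-- B chunks the list by slicing whole rows off the front (no row/count state), same output; objective: simpler.


-- ===== PORT A =====
-- literal transliteration of A: fold over items carrying (keyboard, row, count), flush row when count hits items_per_row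
def make_keyboard (items : List String) (items_per_row : Int) (add_home : String) : List (List String) :=
  let ipr : Int := if items_per_row > 4 ∨ items_per_row < 1 then 4 else items_per_row
  let st := items.foldl (fun (s : List (List String) × List String × Int) item =>
      let kb := s.1
      let row := s.2.1 ++ [item]
      let count := s.2.2 + 1
      if count = ipr then (kb ++ [row], [], 0) else (kb, row, count)) ([], [], 0)
  let keyboard := if st.2.1.length ≠ 0 then st.1 ++ [st.2.1] else st.1
  if add_home ≠ "" then keyboard ++ [[add_home]] else keyboard

-- ===== PORT B =====
-- transliteration of B's while loop: walk a start index i by steps of k, slicing items[i:i+k];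
-- the hypothesis k ≥ 1 (always true at the call site, after normalization) justifies termination
def altChunksIdx (items : List String) (k : Int) (hk : 1 ≤ k) (i : Int) : List (List String) :=
  if _h : i < (items.length : Int) then
    PySem.List.slice items (some i) (some (i + k)) :: altChunksIdx items k hk (i + k)
  else []
termination_by ((items.length : Int) - i).toNat
decreasing_by omega

def make_keyboard_alt (items : List String) (items_per_row : Int) (add_home : String) : List (List String) :=
  let k : Int := if 1 ≤ items_per_row ∧ items_per_row ≤ 4 then items_per_row else 4
  let keyboard := altChunksIdx items k (by dsimp only [k]; split <;> omega) 0
  if add_home ≠ "" then keyboard ++ [[add_home]] else keyboard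

-- ===== PRECONDITION & SPEC =====
def Spec_make_keyboard (items : List String) (items_per_row : Int) (add_home : String) (out : List (List String)) : Prop := out = make_keyboard_alt items items_per_row add_home
instance (items : List String) (items_per_row : Int) (add_home : String) (out : List (List String)) : Decidable (Spec_make_keyboard items items_per_row add_home out) := by unfold Spec_make_keyboard; infer_instance

-- ===== CLAIM (what is proved, stated in full; the proofs are below) =====
def Claim_equal_make_keyboard : Prop := ∀ (items : List String) (items_per_row : Int) (add_home : String), Dom_make_keyboard items items_per_row add_home → Spec_make_keyboard items items_per_row add_home (make_keyboard items items_per_row add_home)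

-- ===== LEMMAS AND PROOFS =====

-- proof-only helper: chunking of a list from the front (k = chunk size, ≥ 1 at every use)
def altChunks (k : Nat) : List String → List (List String)
  | [] => []
  | x :: xs => ((x :: xs).take k) :: altChunks k (xs.drop (k - 1))
termination_by xs => xs.length
decreasing_by simp

-- unfolding equation for altChunks on a nonempty list, with the natural `drop k`
theorem altChunks_cons (k : Nat) (x : String) (xs : List String) (hk : 1 ≤ k) :
    altChunks k (x :: xs) = ((x :: xs).take k) :: altChunks k ((x :: xs).drop k) := by
  obtain ⟨m, rfl⟩ : ∃ m, k = m + 1 := ⟨k - 1, by omega⟩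
  conv_lhs => rw [altChunks]
  simp

theorem altChunks_nil (k : Nat) : altChunks k [] = [] := by rw [altChunks]

-- B's index walk produces exactly the front-chunking of the dropped suffix
theorem altChunksIdx_eq (items : List String) (c : Nat) (hk : 1 ≤ ((c : Int) + 1)) :
    ∀ (i : Int), 0 ≤ i →
    altChunksIdx items ((c : Int) + 1) hk i = altChunks (c + 1) (items.drop i.toNat) := by
  intro i
  fun_induction altChunksIdx items ((c : Int) + 1) hk i with
  | case1 i h ih =>
    intro hi
    have hlt : i.toNat < items.length := by omega
    rw [PySem.List.slice_toNat items hi (by omega)]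
    obtain ⟨y, ys, hy⟩ : ∃ y ys, items.drop i.toNat = y :: ys := by
      cases h' : items.drop i.toNat with
      | nil => exfalso; have := List.length_drop (l := items) (i := i.toNat); rw [h'] at this; simp at this; omega
      | cons a b => exact ⟨a, b, rfl⟩
    rw [hy, altChunks_cons _ _ _ (by omega), ← hy]
    rw [ih (by omega)]
    have hdd : (items.drop i.toNat).drop (c + 1) = items.drop (i + ((c : Int) + 1)).toNat := by
      rw [List.drop_drop]; congr 1; omega
    rw [hdd]
    congr 1
    · congr 1
      omega

  | case2 i h =>
    intro hi
    rw [List.drop_eq_nil_of_le (by omega), altChunks_nil]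

-- the fold of A, started with partial row r (|r| ≤ c) and count |r|, then flushed,
-- equals kb ++ the slice-chunking of r ++ xs with chunk size c+1
theorem foldA_eq_altChunks (c : Nat) (xs : List String) :
    ∀ (kb : List (List String)) (r : List String), r.length ≤ c →
    (let st := xs.foldl (fun (s : List (List String) × List String × Int) item =>
        let kb := s.1
        let row := s.2.1 ++ [item]
        let count := s.2.2 + 1
        if count = ((c : Int) + 1) then (kb ++ [row], [], 0) else (kb, row, count)) (kb, r, (r.length : Int))
     if st.2.1.length ≠ 0 then st.1 ++ [st.2.1] else st.1)
      = kb ++ altChunks (c + 1) (r ++ xs) := by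
  induction xs with
  | nil =>
    intro kb r hr
    simp only [List.foldl_nil, List.append_nil]
    cases r with
    | nil => simp [altChunks_nil]
    | cons y ys =>
      have hlen : (y :: ys).length ≤ c + 1 := by omega
      rw [altChunks_cons _ _ _ (by omega), List.take_of_length_le hlen,
        List.drop_eq_nil_of_le hlen, altChunks_nil]
      simp
  | cons x xs ih =>
    intro kb r hr
    simp only [List.foldl_cons]
    by_cases hc : (r.length : Int) + 1 = (c : Int) + 1
    · have hrc : r.length = c := by omega
      have h1 := ih (kb ++ [r ++ [x]]) [] (by simp)
      simp only [List.length_nil, List.nil_append, Int.natCast_zero] at h1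
      rw [if_pos hc]
      rw [h1]
      rw [show r ++ x :: xs = (r ++ [x]) ++ xs by simp]
      obtain ⟨y, ys, hy⟩ : ∃ y ys, (r ++ [x]) ++ xs = y :: ys := by
        cases h : (r ++ [x]) ++ xs with
        | nil => simp at h
        | cons a b => exact ⟨a, b, rfl⟩
      rw [hy, altChunks_cons _ _ _ (by omega), ← hy]
      have hlen : (r ++ [x]).length = c + 1 := by simp [hrc]
      rw [List.take_append_of_le_length (by omega), List.drop_append_of_le_length (by omega)]
      simp [List.take_of_length_le (le_of_eq hlen), List.drop_eq_nil_of_le (le_of_eq hlen),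
        List.append_assoc]
    · have hrc : r.length < c := by omega
      have h1 := ih kb (r ++ [x]) (by simp; omega)
      rw [if_neg hc]
      have hcast : ((r ++ [x]).length : Int) = (r.length : Int) + 1 := by simp
      rw [← hcast] at *
      simpa [List.append_assoc] using h1

-- ===== VERDICT (by name: the statement is the Claim_ definition above) =====
theorem make_keyboard_spec : Claim_equal_make_keyboard := by
  intro items items_per_row add_home _
  show make_keyboard items items_per_row add_home = make_keyboard_alt items items_per_row add_home
  unfold make_keyboard make_keyboard_alt
  have hnorm : (if items_per_row > 4 ∨ items_per_row < 1 then (4 : Int) else items_per_row)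
      = (if 1 ≤ items_per_row ∧ items_per_row ≤ 4 then items_per_row else 4) := by
    split_ifs with h1 h2 h2 <;> omega
  set k : Int := if 1 ≤ items_per_row ∧ items_per_row ≤ 4 then items_per_row else 4 with hk
  have hk1 : 1 ≤ k := by rw [hk]; split_ifs with h <;> omega
  obtain ⟨c, hc⟩ : ∃ c : Nat, k = (c : Int) + 1 :=
    ⟨(k - 1).toNat, by omega⟩
  have hct : k.toNat = c + 1 := by omega
  simp only [hnorm, ← hk, hc]
  have hB := altChunksIdx_eq items c (by omega) 0 (by omega)
  simp only [Int.toNat_zero, List.drop_zero] at hB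
  rw [hB]
  have := foldA_eq_altChunks c items [] [] (by simp)
  simp only [List.length_nil, Int.natCast_zero, List.nil_append] at this
  rw [this]
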